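-- pv_equiv track=rewrite | github.com/alexmaks8/ylab-course | l1-task4.py | bananas
-- ===== SOURCE A (Python) =====
-- from itertools import combinations
--
-- def bananas(s):
--     result = set()
--     word = 'banana'
--     for comb in combinations(enumerate(s), 6):
--         dash = ['-' for _ in range(len(s))]
--         count = 0
--         for i, k in comb:
--             if k == word[count]:
--                 dash[i] = k
--                 count += 1
--         if count == len(word):
--             result.add(''.join(dash))
--     return result
-- ===== SOURCE B (Python) =====
-- def bananas(s):
--     word = 'banana'
--     n = len(s)
--     res = set()
--
--     def go(start, j, picked):
--         if j == len(word):
--             dash = ['-'] * n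
--             for idx, ch in zip(picked, word):
--                 dash[idx] = ch
--             res.add(''.join(dash))
--             return
--         for i in range(start, n):
--             if s[i] == word[j]:
--                 go(i + 1, j + 1, picked + [i])
--
--     go(0, 0, [])
--     return res
-- ===== Notes on version B (the rewrite author's own statement) =====
-- stated objective: faster
-- what changed: Replaces the enumeration of all C(n,6) six-element combinations with a pruned backtracking search that directly enumerates the increasing index tuples spelling 'banana', producing the same strings in the same discovery order.
import Mathlib
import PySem

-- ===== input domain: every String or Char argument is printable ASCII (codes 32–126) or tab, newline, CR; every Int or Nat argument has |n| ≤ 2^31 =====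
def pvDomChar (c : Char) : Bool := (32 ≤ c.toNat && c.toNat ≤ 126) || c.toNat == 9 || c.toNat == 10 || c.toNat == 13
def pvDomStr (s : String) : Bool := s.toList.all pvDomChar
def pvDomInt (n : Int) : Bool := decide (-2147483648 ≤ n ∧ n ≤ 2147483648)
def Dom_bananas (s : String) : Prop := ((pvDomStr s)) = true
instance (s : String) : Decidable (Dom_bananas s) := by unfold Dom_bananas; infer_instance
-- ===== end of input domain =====

-- B replaces A's scan of all C(n,6) six-element combinations by a pruned backtracking
-- enumeration of exactly the increasing index tuples spelling 'banana' (objective: faster).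

-- ===== PORT A =====
def pvWord : List Char := ['b', 'a', 'n', 'a', 'n', 'a']

-- enumerate(s) starting at index i (A uses pvEnum 0)
def pvEnum (i : Nat) : List Char → List (Nat × Char)
  | [] => []
  | c :: cs => (i, c) :: pvEnum (i + 1) cs

-- itertools.combinations(l, 6): all length-6 subsequences, in itertools' lexicographic order
def pvCombos : Nat → List (Nat × Char) → List (List (Nat × Char))
  | 0, _ => [[]]
  | _ + 1, [] => []
  | n + 1, x :: xs => (pvCombos n xs).map (x :: ·) ++ pvCombos (n + 1) xs

-- A's inner loop over one combination; count < 6 at every access of word[count]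
-- (comb has 6 elements and count grows by at most 1 per element), so getD is exact.
def pvInner (dash : List Char) (count : Nat) (comb : List (Nat × Char)) : List Char × Nat :=
  comb.foldl
    (fun dc ik =>
      if ik.2 == pvWord.getD dc.2 '?' then (dc.1.set ik.1 ik.2, dc.2 + 1) else dc)
    (dash, count)

def bananas (s : String) : List String :=
  (pvCombos 6 (pvEnum 0 s.toList)).foldl
    (fun res comb =>
      let dc := pvInner (List.replicate s.toList.length '-') 0 comb
      if dc.2 == 6 then PySem.Set.add res (String.mk dc.1) else res)
    PySem.Set.empty

-- ===== PORT B =====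
-- backtracking: all increasing index tuples (from position i on) spelling w, lex order
def pvGo : List Char → Nat → List Char → List (List Nat)
  | _, _, [] => [[]]
  | [], _, _ :: _ => []
  | x :: xs, i, c :: ws =>
    (if x == c then (pvGo xs (i + 1) ws).map (i :: ·) else []) ++ pvGo xs (i + 1) (c :: ws)

def pvRender (n : Nat) (idxs : List Nat) : String :=
  String.mk ((idxs.zip pvWord).foldl (fun d p => d.set p.1 p.2) (List.replicate n '-'))

def bananas_alt (s : String) : List String :=
  (pvGo s.toList 0 pvWord).foldl
    (fun res idxs => PySem.Set.add res (pvRender s.toList.length idxs))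
    PySem.Set.empty

-- ===== PRECONDITION & SPEC =====
def Spec_bananas (s : String) (out : List String) : Prop := out = bananas_alt s
instance (s : String) (out : List String) : Decidable (Spec_bananas s out) := by unfold Spec_bananas; infer_instance

-- ===== CLAIM (what is proved, stated in full; the proofs are below) =====
def Claim_equal_bananas : Prop := ∀ (s : String), Dom_bananas s → Spec_bananas s (bananas s)

-- ===== LEMMAS AND PROOFS =====

lemma pvInner_nil (dash : List Char) (c : Nat) : pvInner dash c [] = (dash, c) := rfl

lemma pvInner_cons (dash : List Char) (c : Nat) (ik : Nat × Char) (rest : List (Nat × Char)) :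
    pvInner dash c (ik :: rest) =
      if ik.2 == pvWord.getD c '?' then pvInner (dash.set ik.1 ik.2) (c + 1) rest
      else pvInner dash c rest := by
  by_cases h : (ik.2 == pvWord.getD c '?') = true
  · rw [if_pos h]; simp only [pvInner, List.foldl_cons, h, if_pos]
  · rw [if_neg h]
    simp only [pvInner, List.foldl_cons]
    rw [eq_false_of_ne_true h]
    simp

-- every member of pvCombos n l has length n
lemma pvCombos_length {n : Nat} {l : List (Nat × Char)} {c : List (Nat × Char)}
    (h : c ∈ pvCombos n l) : c.length = n := by
  induction l generalizing n c with
  | nil =>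
    cases n with
    | zero => simp [pvCombos] at h; simp [h]
    | succ n => simp [pvCombos] at h
  | cons x xs ih =>
    cases n with
    | zero => simp [pvCombos] at h; simp [h]
    | succ n =>
      simp [pvCombos] at h
      rcases h with ⟨c', hc', rfl⟩ | h
      · simp [ih hc']
      · exact ih h

-- the greedy count never exceeds start + number of processed elements
lemma pvInner_le (comb : List (Nat × Char)) (dash : List Char) (c : Nat) :
    (pvInner dash c comb).2 ≤ c + comb.length := by
  induction comb generalizing dash c with
  | nil => simp [pvInner_nil]
  | cons ik rest ih =>
    rw [pvInner_cons]
    by_cases h : (ik.2 == pvWord.getD c '?') = true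
    · rw [if_pos h]
      have := ih (dash.set ik.1 ik.2) (c + 1)
      simp only [List.length_cons]; omega
    · rw [if_neg h]
      have := ih dash c
      simp only [List.length_cons]; omega

-- count reaches c + len(comb) exactly when comb's characters are the word segment at c
lemma pvInner_eq_iff (comb : List (Nat × Char)) (dash : List Char) (c : Nat)
    (h : c + comb.length ≤ pvWord.length) :
    ((pvInner dash c comb).2 = c + comb.length ↔
      comb.map Prod.snd = (pvWord.drop c).take comb.length) := by
  induction comb generalizing dash c with
  | nil => simp [pvInner_nil]
  | cons ik rest ih =>
    have hc : c < pvWord.length := by simp only [List.length_cons] at h; omega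
    have hget : pvWord.getD c '?' = pvWord[c] := List.getD_eq_getElem pvWord '?' hc
    have hdrop : pvWord.drop c = pvWord[c] :: pvWord.drop (c + 1) :=
      List.drop_eq_getElem_cons hc
    have h' : (c + 1) + rest.length ≤ pvWord.length := by
      simp only [List.length_cons] at h; omega
    rw [pvInner_cons, List.map_cons, List.length_cons, hdrop, List.take_succ_cons,
      List.cons_eq_cons]
    by_cases hk : (ik.2 == pvWord.getD c '?') = true
    · have hk' : ik.2 = pvWord[c] := by
        have := (beq_iff_eq).mp hk; rw [hget] at this; exact this
      rw [if_pos hk]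
      constructor
      · intro he
        refine ⟨hk', (ih (dash.set ik.1 ik.2) (c + 1) h').mp ?_⟩
        omega
      · intro he
        have := (ih (dash.set ik.1 ik.2) (c + 1) h').mpr he.2
        omega
    · rw [if_neg hk]
      constructor
      · intro he
        exfalso
        have := pvInner_le rest dash c
        omega
      · intro he
        exfalso
        apply hk
        rw [hget]
        exact beq_iff_eq.mpr he.1

-- when the combination matches, the dash list is just the fold of the index assignments
lemma pvInner_dash (comb : List (Nat × Char)) (dash : List Char) (c : Nat)
    (h : c + comb.length ≤ pvWord.length)
    (hm : comb.map Prod.snd = (pvWord.drop c).take comb.length) :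
    (pvInner dash c comb).1 = comb.foldl (fun d ik => d.set ik.1 ik.2) dash := by
  induction comb generalizing dash c with
  | nil => simp [pvInner_nil]
  | cons ik rest ih =>
    have hc : c < pvWord.length := by simp only [List.length_cons] at h; omega
    have hget : pvWord.getD c '?' = pvWord[c] := List.getD_eq_getElem pvWord '?' hc
    have hdrop : pvWord.drop c = pvWord[c] :: pvWord.drop (c + 1) :=
      List.drop_eq_getElem_cons hc
    have h' : (c + 1) + rest.length ≤ pvWord.length := by
      simp only [List.length_cons] at h; omega
    rw [List.map_cons, List.length_cons, hdrop, List.take_succ_cons, List.cons_eq_cons] at hm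
    have hk : (ik.2 == pvWord.getD c '?') = true := by
      rw [hget]; exact beq_iff_eq.mpr hm.1
    rw [pvInner_cons, if_pos hk, List.foldl_cons]
    exact ih (dash.set ik.1 ik.2) (c + 1) h' hm.2

-- the combinations whose characters spell w, projected to their indices, are pvGo's tuples
lemma pvCombos_filter_eq_go (xs : List Char) (i : Nat) (w : List Char) :
    ((pvCombos w.length (pvEnum i xs)).filter
        (fun c => c.map Prod.snd == w)).map (fun c => c.map Prod.fst)
      = pvGo xs i w := by
  induction xs generalizing i w with
  | nil =>
    cases w with
    | nil => simp [pvCombos, pvEnum, pvGo]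
    | cons c ws => simp [pvCombos, pvEnum, pvGo]
  | cons x xs ih =>
    cases w with
    | nil => simp [pvCombos, pvEnum, pvGo]
    | cons c ws =>
      simp only [pvEnum, List.length_cons, pvCombos, pvGo]
      rw [List.filter_append, List.map_append]
      congr 1
      · rw [List.filter_map, List.map_map]
        by_cases hx : (x == c) = true
        · have hx' : x = c := beq_iff_eq.mp hx
          rw [if_pos hx, ← ih (i + 1) ws, List.map_map]
          have hfil : List.filter ((fun c' => c'.map Prod.snd == c :: ws) ∘ (fun a => (i, x) :: a))
                (pvCombos ws.length (pvEnum (i + 1) xs))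
              = List.filter (fun c' => c'.map Prod.snd == ws)
                (pvCombos ws.length (pvEnum (i + 1) xs)) := by
            apply List.filter_congr
            intro a _
            simp [Function.comp, hx']
          rw [hfil]
          apply List.map_congr_left
          intro a _
          simp [Function.comp]
        · rw [if_neg hx]
          have hnil : List.filter ((fun c' => c'.map Prod.snd == c :: ws) ∘ (fun a => (i, x) :: a))
              (pvCombos ws.length (pvEnum (i + 1) xs)) = [] := by
            apply List.filter_eq_nil_iff.mpr
            intro a _
            simp only [Function.comp, List.map_cons]
            intro hcontra
            have := List.cons_eq_cons.mp (beq_iff_eq.mp hcontra)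
            exact absurd (beq_iff_eq.mpr this.1) (by simpa using hx)
          rw [hnil, List.map_nil]
      · exact ih (i + 1) (c :: ws)

-- two folds over the same list agree if the step functions agree on its members
lemma foldl_congr_mem' {α β : Type} (l : List α) (f g : β → α → β) (a : β)
    (h : ∀ x ∈ l, ∀ b, f b x = g b x) : l.foldl f a = l.foldl g a := by
  induction l generalizing a with
  | nil => rfl
  | cons x xs ih =>
    rw [List.foldl_cons, List.foldl_cons, h x (by simp)]
    exact ih _ (fun y hy b => h y (by simp [hy]) b)

-- fold with a conditional add equals the fold of add over the filtered, mapped list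
lemma foldl_if_filter_map {α : Type} (l : List α) (p : α → Bool) (f : α → String)
    (acc : List String) :
    l.foldl (fun a x => if p x then PySem.Set.add a (f x) else a) acc
      = ((l.filter p).map f).foldl (fun a s => PySem.Set.add a s) acc := by
  induction l generalizing acc with
  | nil => rfl
  | cons x xs ih =>
    by_cases h : p x
    · simp [h, ih]
    · simp [h, ih]

lemma pvWord_len : pvWord.length = 6 := rfl

-- ===== VERDICT (by name: the statement is the Claim_ definition above) =====
theorem bananas_spec : Claim_equal_bananas := by
  intro s _
  unfold Spec_bananas bananas bananas_alt
  set n := s.toList.length with hn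
  -- step 1: rewrite A's fold step on members of pvCombos 6 (pvEnum 0 s.toList)
  rw [foldl_congr_mem' (pvCombos 6 (pvEnum 0 s.toList)) _
      (fun res comb => if comb.map Prod.snd == pvWord
        then PySem.Set.add res (pvRender n (comb.map Prod.fst)) else res)
      PySem.Set.empty ?_]
  · -- step 2: fold over filtered, mapped list
    rw [foldl_if_filter_map]
    have h6 : (6 : Nat) = pvWord.length := rfl
    rw [h6, show (fun (c : List (Nat × Char)) => pvRender n (c.map Prod.fst))
        = (pvRender n) ∘ (fun c => c.map Prod.fst) from rfl,
      ← List.map_map, pvCombos_filter_eq_go s.toList 0 pvWord, List.foldl_map]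
  · intro comb hcomb res
    have hlen : comb.length = 6 := pvCombos_length hcomb
    have hle : 0 + comb.length ≤ pvWord.length := by rw [hlen, pvWord_len]
    have hiff := pvInner_eq_iff comb (List.replicate n '-') 0 hle
    have htake : (pvWord.drop 0).take comb.length = pvWord := by
      rw [hlen, List.drop_zero]; rfl
    rw [htake] at hiff
    by_cases hp : comb.map Prod.snd = pvWord
    · have hcount : (pvInner (List.replicate n '-') 0 comb).2 = 6 := by
        have := hiff.mpr hp; omega
      have hdash := pvInner_dash comb (List.replicate n '-') 0 hle (by rw [htake]; exact hp)
      have hzip : (comb.map Prod.fst).zip pvWord = comb := by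
        rw [← hp]
        exact Eq.symm (List.zip_of_prod rfl rfl)
      simp only [hcount, beq_iff_eq, hp, if_pos]
      congr 1
      rw [pvRender, hzip, hdash]
    · have hcount : (pvInner (List.replicate n '-') 0 comb).2 ≠ 6 := by
        intro he
        exact hp (hiff.mp (by omega))
      simp only [beq_iff_eq, hp, hcount, if_false]
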